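-- pv_equiv track=rewrite | github.com/pypi-data/pypi-mirror-401 | packages/pyqt-code-editor/pyqt_code_editor-0.0.55.tar.gz/pyqt_code_editor-0.0.55/pyqt_code_editor/utils/languages/python/_auto_indent.py | _line_col_from_idx
-- ===== SOURCE A (Python) =====
-- def _line_col_from_idx(full_text, char_index):
--     """
--     Return the 0-based (line, column) pair in `full_text` for the given `char_index`.
--     If char_index is out of range, this function raises an IndexError.
--     """
--     if not (0 <= char_index < len(full_text)):
--         raise IndexError("char_index out of range.")
--
--     line = 0
--     column = 0
--     idx = 0
--
--     for ch in full_text: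
--         if idx == char_index:
--             return (line, column)
--         if ch == '\n':
--             line += 1
--             column = 0
--         else:
--             column += 1
--         idx += 1
--
--     # If char_index matches len(full_text)-1, return the final position:
--     return (line, column)
-- ===== SOURCE B (Python) =====
-- def _line_col_from_idx(full_text, char_index):
--     """
--     Return the 0-based (line, column) pair in `full_text` for the given `char_index`.
--     If char_index is out of range, this function raises an IndexError.
--     """
--     if not (0 <= char_index < len(full_text)):
--         raise IndexError("char_index out of range.")
--     prefix = full_text[:char_index]
--     return (prefix.count('\n'), char_index - prefix.rfind('\n') - 1)
-- ===== Notes on version B (the rewrite author's own statement) =====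
-- stated objective: idiomatic
-- what changed: Replaces the stateful character-by-character loop with two prefix queries on full_text[:char_index]: the line is the newline count of the prefix and the column is the distance past the last newline (rfind returning -1 makes column = char_index when there is none).
import Mathlib
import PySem

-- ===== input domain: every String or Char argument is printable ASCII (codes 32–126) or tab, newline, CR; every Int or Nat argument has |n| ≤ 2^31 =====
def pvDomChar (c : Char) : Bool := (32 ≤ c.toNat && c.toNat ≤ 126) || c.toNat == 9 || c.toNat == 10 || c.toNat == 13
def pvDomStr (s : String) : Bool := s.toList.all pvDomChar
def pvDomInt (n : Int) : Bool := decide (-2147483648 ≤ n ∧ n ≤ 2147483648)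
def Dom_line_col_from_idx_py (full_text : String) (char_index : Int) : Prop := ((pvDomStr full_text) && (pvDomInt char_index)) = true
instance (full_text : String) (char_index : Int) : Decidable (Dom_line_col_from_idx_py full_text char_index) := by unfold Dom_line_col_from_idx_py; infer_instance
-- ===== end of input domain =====

-- B replaces A's stateful per-character loop by two prefix queries (newline count, distance past the last newline); same cost, more idiomatic.

-- ===== PORT A =====
-- the 'for ch in full_text' loop with its early return, state (line, column, idx)
def lcGoA : List Char → Int → Int → Int → Int → Int × Int
  | [], line, col, _, _ => (line, col)
  | ch :: rest, line, col, idx, ci =>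
    if idx == ci then (line, col)
    else if ch == '\n' then lcGoA rest (line + 1) 0 (idx + 1) ci
    else lcGoA rest line (col + 1) (idx + 1) ci

def line_col_from_idx_py (full_text : String) (char_index : Int) : Int × Int :=
  if ¬(0 ≤ char_index ∧ char_index < PySem.Str.len full_text) then (0, 0)  -- Python raises IndexError here; excluded by Pre_
  else lcGoA full_text.toList 0 0 0 char_index

-- ===== PORT B =====
def line_col_from_idx_py_alt (full_text : String) (char_index : Int) : Int × Int :=
  if ¬(0 ≤ char_index ∧ char_index < PySem.Str.len full_text) then (0, 0)  -- Python raises IndexError here; excluded by Pre_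
  else
    let pfx := PySem.Str.slice full_text none (some char_index)
    ((PySem.Str.count pfx "\n" : Int), char_index - PySem.Str.rfind pfx "\n" - 1)

-- ===== PRECONDITION & SPEC =====
-- Pre_ = exactly the inputs on which Python A returns (it raises IndexError on an out-of-range index)
def Pre_line_col_from_idx_py (full_text : String) (char_index : Int) : Prop :=
  0 ≤ char_index ∧ char_index < PySem.Str.len full_text
instance (full_text : String) (char_index : Int) : Decidable (Pre_line_col_from_idx_py full_text char_index) := by unfold Pre_line_col_from_idx_py; infer_instance
def pvWitness_line_col_from_idx_py : String × Int := ("ab\ncd", 4)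

def Spec_line_col_from_idx_py (full_text : String) (char_index : Int) (out : Int × Int) : Prop := out = line_col_from_idx_py_alt full_text char_index
instance (full_text : String) (char_index : Int) (out : Int × Int) : Decidable (Spec_line_col_from_idx_py full_text char_index out) := by unfold Spec_line_col_from_idx_py; infer_instance

-- ===== CLAIM (what is proved, stated in full; the proofs are below) =====
def Claim_equal_line_col_from_idx_py : Prop := ∀ (full_text : String) (char_index : Int), Dom_line_col_from_idx_py full_text char_index → Pre_line_col_from_idx_py full_text char_index → Spec_line_col_from_idx_py full_text char_index (line_col_from_idx_py full_text char_index)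

-- ===== LEMMAS AND PROOFS =====

-- one step of A's loop body, as a fold step
def pvStep (p : Int × Int) (c : Char) : Int × Int :=
  if c == '\n' then (p.1 + 1, 0) else (p.1, p.2 + 1)

-- length of the text after the last newline
def pvTw (l : List Char) : Nat := (l.reverse.takeWhile (fun c => !(c == '\n'))).length

-- index of the last newline, -1 if none
def pvLastNL (l : List Char) : Int := (l.length : Int) - pvTw l - 1

theorem pvTw_le (l : List Char) : pvTw l ≤ l.length := by
  have h := (List.takeWhile_prefix (l := l.reverse) (p := fun c => !(c == '\n'))).length_le
  simpa [pvTw] using h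

theorem pvTw_append (l : List Char) (c : Char) :
    pvTw (l ++ [c]) = if c == '\n' then 0 else pvTw l + 1 := by
  simp [pvTw, List.takeWhile_cons]
  by_cases h : c = '\n' <;> simp [h]

theorem pvTw_of_not_mem (l : List Char) (h : '\n' ∉ l) : pvTw l = l.length := by
  have : l.reverse.takeWhile (fun c => !(c == '\n')) = l.reverse := by
    rw [List.takeWhile_eq_self_iff]
    intro x hx
    simp only [List.mem_reverse] at hx
    simp only [Bool.not_eq_eq_eq_not, Bool.not_true, beq_eq_false_iff_ne, ne_eq]
    intro hxe; exact h (hxe ▸ hx)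
  simp [pvTw, this]

theorem pvFold (l : List Char) (a b : Int) :
    l.foldl pvStep (a, b) =
      (a + l.count '\n', if '\n' ∈ l then (pvTw l : Int) else b + l.length) := by
  induction l using List.reverseRecOn generalizing a b with
  | nil => simp [pvTw]
  | append_singleton l c ih =>
    rw [List.foldl_append]
    rw [ih]
    simp only [List.foldl_cons, List.foldl_nil, pvStep, List.count_append, List.mem_append,
      pvTw_append, List.length_append, List.count_singleton, List.mem_singleton]
    by_cases hc : c = '\n'
    · subst hc
      simp
      omega
    · have hc' : ('\n' : Char) ≠ c := fun h => hc h.symm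
      by_cases hm : '\n' ∈ l <;>
        simp [hc, hc', hm] <;> push_cast <;> omega

theorem lcGoA_eq (l : List Char) :
    ∀ (line col idx ci : Int), 0 ≤ ci - idx → (ci - idx).toNat ≤ l.length →
      lcGoA l line col idx ci = (l.take (ci - idx).toNat).foldl pvStep (line, col) := by
  induction l with
  | nil =>
    intro line col idx ci h1 h2
    simp only [List.length_nil, Nat.le_zero] at h2
    simp [lcGoA, h2]
  | cons ch rest ih =>
    intro line col idx ci h1 h2
    by_cases he : idx = ci
    · have : (ci - idx).toNat = 0 := by omega
      simp [lcGoA, he, this]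
    · have hne : (idx == ci) = false := by simp [he]
      have hk : (ci - idx).toNat = (ci - (idx + 1)).toNat + 1 := by omega
      have h1' : 0 ≤ ci - (idx + 1) := by omega
      have h2' : (ci - (idx + 1)).toNat ≤ rest.length := by
        simp only [List.length_cons] at h2; omega
      rw [hk]
      by_cases hc : ch = '\n'
      · simp only [lcGoA, hne, Bool.false_eq_true, if_false, hc, beq_self_eq_true, if_true,
          List.take_succ_cons, List.foldl_cons]
        rw [ih _ _ _ _ h1' h2']
        simp [pvStep]
      · have hc' : (ch == '\n') = false := by simp [hc]
        simp only [lcGoA, hne, Bool.false_eq_true, if_false, hc', List.take_succ_cons,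
          List.foldl_cons]
        rw [ih _ _ _ _ h1' h2']
        simp [pvStep, hc']

theorem pvCountGo (fuel : Nat) :
    ∀ (l : List Char) (acc : Nat), l.length ≤ fuel →
      PySem.Chars.count.go ['\n'] fuel l acc = acc + l.count '\n' := by
  induction fuel with
  | zero =>
    intro l acc h
    have : l = [] := by cases l <;> simp_all
    subst this
    simp [PySem.Chars.count.go]
  | succ n ih =>
    intro l acc h
    cases l with
    | nil => simp [PySem.Chars.count.go]
    | cons c t =>
      rw [PySem.Chars.count.go]
      by_cases hc : c = '\n'
      · subst hc
        have hp : List.isPrefixOf ['\n'] ('\n' :: t) = true := by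
          simp [List.isPrefixOf]
        simp only [hp, if_true, List.length_singleton, List.drop_succ_cons, List.drop_zero]
        rw [ih t (acc + 1) (by simp at h; omega)]
        simp [List.count_cons]
        omega
      · have hc' : ('\n' : Char) ≠ c := fun h => hc h.symm
        have hp : List.isPrefixOf ['\n'] (c :: t) = false := by
          simp [List.isPrefixOf, hc']
        simp only [hp, Bool.false_eq_true, if_false]
        rw [ih t acc (by simp at h; omega)]
        simp [List.count_cons, hc, hc']

theorem pvLastNL_append (l : List Char) (c : Char) :
    pvLastNL (l ++ [c]) = if c = '\n' then (l.length : Int) else pvLastNL l := by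
  simp only [pvLastNL, pvTw_append, List.length_append, List.length_singleton]
  by_cases hc : c = '\n' <;> simp [hc] <;> omega

theorem pvRfindGo (n : Nat) (s : List Char) :
    PySem.Chars.rfind.go s ['\n'] n = pvLastNL (s.take (n + 1)) := by
  induction n with
  | zero =>
    rw [PySem.Chars.rfind.go]
    cases s with
    | nil => simp [List.isPrefixOf, pvLastNL, pvTw]
    | cons c t =>
      by_cases hc : c = '\n'
      · subst hc
        simp [List.isPrefixOf, pvLastNL, pvTw]
      · have hc' : ('\n' : Char) ≠ c := fun h => hc h.symm
        have hp : List.isPrefixOf ['\n'] (c :: t) = false := by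
          simp [List.isPrefixOf, hc']
        simp [hp, pvLastNL, pvTw, hc]
  | succ n ih =>
    rw [PySem.Chars.rfind.go]
    rcases hd : s.drop (n + 1) with _ | ⟨c, t⟩
    · have hle : s.length ≤ n + 1 := by
        have := congrArg List.length hd
        simp at this; omega
      have hp : List.isPrefixOf ['\n'] ([] : List Char) = false := by
        simp [List.isPrefixOf]
      rw [hp]
      simp only [Bool.false_eq_true, if_false, ih]
      rw [List.take_of_length_le (by omega), List.take_of_length_le (by omega)]
    · have hlt : n + 1 < s.length := by
        have := congrArg List.length hd
        simp at this; omega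
      have hget : s[n + 1]? = some c := by
        have := congrArg List.head? hd
        rwa [List.head?_drop] at this
      have htake : s.take (n + 2) = s.take (n + 1) ++ [c] := by
        rw [List.take_add_one, hget]; rfl
      rw [htake, pvLastNL_append]
      by_cases hc : c = '\n'
      · subst hc
        have hp : List.isPrefixOf ['\n'] ('\n' :: t) = true := by
          simp [List.isPrefixOf]
        rw [hp]
        simp [List.length_take, Nat.min_eq_left (by omega : n + 1 ≤ s.length)]
      · have hc' : ('\n' : Char) ≠ c := fun h => hc h.symm
        have hp : List.isPrefixOf ['\n'] (c :: t) = false := by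
          simp [List.isPrefixOf, hc']
        rw [hp]
        simp [hc, ih]

theorem pvCount_eq (l : List Char) : PySem.Chars.count l ['\n'] = l.count '\n' := by
  rw [PySem.Chars.count]
  simp only [List.isEmpty_cons, if_false, Bool.false_eq_true]
  rw [pvCountGo l.length l 0 le_rfl]
  simp

theorem pvRfind_eq (l : List Char) : PySem.Chars.rfind l ['\n'] = pvLastNL l := by
  rw [PySem.Chars.rfind, pvRfindGo]
  rw [List.take_of_length_le (by omega)]

-- ===== VERDICT (by name: the statement is the Claim_ definition above) =====
theorem line_col_from_idx_py_spec : Claim_equal_line_col_from_idx_py := by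
  intro full_text char_index _ hpre
  obtain ⟨h0, hlt⟩ := hpre
  unfold Spec_line_col_from_idx_py line_col_from_idx_py line_col_from_idx_py_alt
  rw [if_neg (not_not_intro ⟨h0, hlt⟩), if_neg (not_not_intro ⟨h0, hlt⟩)]
  have hlen : char_index < (full_text.toList.length : Int) := by
    simpa [PySem.Str.len] using hlt
  set p : List Char := full_text.toList.take char_index.toNat with hp
  have hplen : p.length = char_index.toNat := by
    rw [hp, List.length_take]; omega
  -- A's side
  have hA : lcGoA full_text.toList 0 0 0 char_index = p.foldl pvStep (0, 0) := by
    rw [lcGoA_eq full_text.toList 0 0 0 char_index (by omega)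
      (by simp only [sub_zero]; omega)]
    simp [hp]
  -- B's side: the prefix string is p
  have hslice : (PySem.Str.slice full_text none (some char_index)).toList = p := by
    rw [PySem.Str.toList_slice]
    simp only [PySem.Chars.slice]
    rw [PySem.List.slice_to _ h0]
  have hnl : ("\n" : String).toList = ['\n'] := by decide
  have hcount : PySem.Str.count (PySem.Str.slice full_text none (some char_index)) "\n"
      = p.count '\n' := by
    rw [PySem.Str.count_eq, hslice, hnl, pvCount_eq]
  have hrfind : PySem.Str.rfind (PySem.Str.slice full_text none (some char_index)) "\n"
      = pvLastNL p := by
    rw [PySem.Str.rfind_eq, hslice, hnl, pvRfind_eq]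
  rw [hA, pvFold]
  have htw_le : pvTw p ≤ p.length := pvTw_le p
  simp only [hcount, hrfind, Prod.mk.injEq, pvLastNL]
  by_cases hm : '\n' ∈ p
  · simp only [hm, if_true]
    constructor <;> omega
  · have htw := pvTw_of_not_mem p hm
    simp only [hm, if_false]
    constructor <;> omega
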